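-- pv_equiv track=rewrite | github.com/MoritzKronberger/hws-micro-speech-to-text | micro-stt/app/quality_benchmark/normalization.py | normalize_transcriptions
-- ===== SOURCE A (Python) =====
-- def normalize_transcriptions(transcriptions: list[str]) -> list[str]:
--     """Normalize transcriptions for comparison.
--
--     - Remove punctuation and quotation marks
--     - To lower case
--     """
--     invalid_characters = ',;.:-–—\'"!?'
--     norm_transcriptions: list[str] = []
--     for transcription in transcriptions:
--         for char in invalid_characters:
--             transcription = transcription.replace(char, '')
--         norm_transcriptions.append(transcription.lower())
--     return norm_transcriptions
-- ===== SOURCE B (Python) =====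
-- def normalize_transcriptions(transcriptions: list[str]) -> list[str]:
--     """Normalize transcriptions for comparison.
--
--     - Remove punctuation and quotation marks
--     - To lower case
--     """
--     invalid = frozenset(',;.:-\u2013\u2014\'"!?')
--     return [''.join(c for c in t if c not in invalid).lower() for t in transcriptions]
-- ===== Notes on version B (the rewrite author's own statement) =====
-- stated objective: idiomatic
-- what changed: B makes one character-filtering pass over each string against a precomputed frozenset of invalid characters (list comprehension over transcriptions), instead of A's k full replace-passes per string with an accumulator list.
import Mathlib
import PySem

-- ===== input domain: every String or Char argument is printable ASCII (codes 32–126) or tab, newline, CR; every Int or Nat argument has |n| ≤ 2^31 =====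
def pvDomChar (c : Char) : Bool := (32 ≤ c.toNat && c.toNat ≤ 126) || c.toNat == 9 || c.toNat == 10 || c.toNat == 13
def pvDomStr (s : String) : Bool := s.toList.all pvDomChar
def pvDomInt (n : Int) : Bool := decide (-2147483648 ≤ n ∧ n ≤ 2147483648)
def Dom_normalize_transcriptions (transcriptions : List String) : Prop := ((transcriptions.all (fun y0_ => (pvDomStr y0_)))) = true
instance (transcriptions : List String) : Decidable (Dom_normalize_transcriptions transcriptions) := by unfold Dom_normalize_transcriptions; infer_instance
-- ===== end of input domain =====

-- B strips the invalid characters in a single filtering pass per string against a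
-- precomputed set, instead of A's one replace-pass per invalid character (idiomatic).

-- ===== PORT A =====
def normalize_transcriptions (transcriptions : List String) : List String :=
  let invalid_characters : String := ",;.:-–—'\"!?"
  transcriptions.foldl
    (fun norm_transcriptions transcription =>
      let transcription :=
        invalid_characters.toList.foldl
          (fun tr ch => PySem.Str.replace tr (String.ofList [ch]) "") transcription
      norm_transcriptions ++ [PySem.Str.lower transcription]) []

-- ===== PORT B =====
def normalize_transcriptions_alt (transcriptions : List String) : List String :=
  let invalid : PySem.Set Char := PySem.Set.ofList ",;.:-–—'\"!?".toList
  transcriptions.map (fun t =>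
    PySem.Str.lower (String.ofList (t.toList.filter (fun c => !(PySem.Set.contains invalid c)))))

-- ===== PRECONDITION & SPEC =====
def Spec_normalize_transcriptions (transcriptions : List String) (out : List String) : Prop := out = normalize_transcriptions_alt transcriptions
instance (transcriptions : List String) (out : List String) : Decidable (Spec_normalize_transcriptions transcriptions out) := by unfold Spec_normalize_transcriptions; infer_instance

-- ===== CLAIM (what is proved, stated in full; the proofs are below) =====
def Claim_equal_normalize_transcriptions : Prop := ∀ (transcriptions : List String), Dom_normalize_transcriptions transcriptions → Spec_normalize_transcriptions transcriptions (normalize_transcriptions transcriptions)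

-- ===== LEMMAS AND PROOFS =====

-- One replace-pass deleting a single character is a filter.
theorem replace_go_filter (c : Char) :
    ∀ (l acc : List Char) (fuel : Nat), l.length ≤ fuel →
      PySem.Chars.replace.go [c] [] fuel l acc =
        acc.reverse ++ l.filter (fun x => x != c) := by
  intro l
  induction l with
  | nil =>
      intro acc fuel _
      cases fuel <;> simp [PySem.Chars.replace.go]
  | cons x t ih =>
      intro acc fuel hf
      cases fuel with
      | zero => simp at hf
      | succ n =>
        simp only [List.length_cons, Nat.succ_le_succ_iff] at hf
        by_cases hx : x = c
        · subst hx
          simp [PySem.Chars.replace.go, List.isPrefixOf, ih _ _ hf]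
        · have : ([c].isPrefixOf (x :: t)) = false := by
            simp [List.isPrefixOf, Ne.symm hx]
          simp [PySem.Chars.replace.go, this, ih _ _ hf, hx]

theorem replace_one_filter (cs : List Char) (c : Char) :
    PySem.Chars.replace cs [c] [] = cs.filter (fun x => x != c) := by
  simp [PySem.Chars.replace, replace_go_filter c cs [] cs.length (le_refl _)]

-- The fold of single-character replace passes is one membership filter.
theorem foldl_replace_filter (inv : List Char) :
    ∀ (t : String),
      (inv.foldl (fun tr ch => PySem.Str.replace tr (String.ofList [ch]) "") t).toList =
        t.toList.filter (fun x => !(inv.contains x)) := by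
  induction inv with
  | nil => intro t; simp
  | cons c inv ih =>
      intro t
      simp only [List.foldl_cons, ih]
      simp only [PySem.Str.replace, String.toList_ofList]
      rw [show ("" : String).toList = [] from rfl, replace_one_filter,
        List.filter_filter]
      apply List.filter_congr
      intro x _
      by_cases hx : x = c <;> simp [hx]

set_option maxRecDepth 10000 in
theorem per_string (t : String) :
    PySem.Str.lower
        ((",;.:-–—'\"!?".toList).foldl
          (fun tr ch => PySem.Str.replace tr (String.ofList [ch]) "") t) =
      PySem.Str.lower (String.ofList (t.toList.filter
        (fun c => !(PySem.Set.contains (PySem.Set.ofList ",;.:-–—'\"!?".toList) c)))) := by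
  have h := foldl_replace_filter (",;.:-–—'\"!?".toList) t
  have hset : PySem.Set.ofList ",;.:-–—'\"!?".toList = ",;.:-–—'\"!?".toList :=
    PySem.Set.ofList_eq_self_of_nodup (xs := ",;.:-–—'\"!?".toList) (by decide)
  rw [hset]
  simp only [PySem.Str.lower, String.toList_ofList, h,
    PySem.Set.contains_eq_listContains]

theorem foldl_append_map {α β : Type} (f : α → β) :
    ∀ (l : List α) (acc : List β),
      l.foldl (fun r a => r ++ [f a]) acc = acc ++ l.map f := by
  intro l
  induction l with
  | nil => simp
  | cons a l ih => intro acc; simp [ih]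

-- ===== VERDICT (by name: the statement is the Claim_ definition above) =====
theorem normalize_transcriptions_spec : Claim_equal_normalize_transcriptions := by
  intro ts _
  unfold Spec_normalize_transcriptions normalize_transcriptions normalize_transcriptions_alt
  simp only [foldl_append_map, List.nil_append]
  apply List.map_congr_left
  intro t _
  exact per_string t
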